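-- pv_equiv track=rewrite | github.com/YuriCorredor/learning | Learning/Python Small Projects and Code Snippets/Aleatório/HANGMAN.py | criptografar
-- ===== SOURCE A (Python) =====
-- def criptografar(word):
--     new_word = ""
--     r = 0
--     for i in range(len(word)):
--         if word[i] == " ":
--             new_word += word[i]
--             r += 1
--         else:
--             new_word += "-"
--     return new_word.upper()
-- ===== SOURCE B (Python) =====
-- def criptografar(word):
--     return " ".join("-" * len(part) for part in word.split(" "))
-- ===== Notes on version B (the rewrite author's own statement) =====
-- stated objective: faster
-- what changed: Replaces the per-index loop that grows a string char by char (plus a dead counter and a no-op .upper()) by a split-on-space/map/join one-liner: each space-delimited fragment becomes a dash run of the same length.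
import Mathlib
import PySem

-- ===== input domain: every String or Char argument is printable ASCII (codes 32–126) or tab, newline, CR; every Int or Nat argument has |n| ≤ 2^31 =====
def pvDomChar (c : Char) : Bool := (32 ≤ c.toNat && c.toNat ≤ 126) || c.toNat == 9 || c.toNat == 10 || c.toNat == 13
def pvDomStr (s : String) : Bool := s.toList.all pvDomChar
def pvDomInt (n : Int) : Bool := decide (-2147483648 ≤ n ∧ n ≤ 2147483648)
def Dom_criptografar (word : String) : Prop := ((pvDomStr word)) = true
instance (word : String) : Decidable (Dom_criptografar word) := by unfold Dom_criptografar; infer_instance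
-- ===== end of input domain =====

-- B masks each space-delimited fragment with a dash run via split/join instead of A's per-index branch loop; same return value on every input.

-- ===== PORT A =====
-- literal port of A: indexed loop over range(len(word)), accumulating (new_word, r), then .upper()
def criptografar (word : String) : String :=
  let cs := word.toList
  let res := (PySem.List.pyRange 0 cs.length 1).foldl
    (fun (st : List Char × Int) i =>
      match PySem.List.pyGet? cs i with
      | some c => if c = ' ' then (st.1 ++ [c], st.2 + 1) else (st.1 ++ ['-'], st.2)
      | none => st)   -- unreachable: every i produced by range(len) is in range
    (([] : List Char), (0 : Int))
  String.ofList (PySem.Chars.upper res.1)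

-- ===== PORT B =====
-- literal port of Source B: " ".join("-" * len(part) for part in word.split(" "))
def criptografar_alt (word : String) : String :=
  String.ofList (PySem.Chars.join [' ']
    ((PySem.Chars.splitOn word.toList [' ']).map (fun p => List.replicate p.length '-')))

-- ===== PRECONDITION & SPEC =====
def Spec_criptografar (word : String) (out : String) : Prop := out = criptografar_alt word
instance (word : String) (out : String) : Decidable (Spec_criptografar word out) := by unfold Spec_criptografar; infer_instance

-- ===== CLAIM (what is proved, stated in full; the proofs are below) =====
def Claim_equal_criptografar : Prop := ∀ (word : String), Dom_criptografar word → Spec_criptografar word (criptografar word)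

-- ===== LEMMAS AND PROOFS =====

-- the common value: every non-space char becomes '-'
def maskChar (c : Char) : Char := if c = ' ' then ' ' else '-'

def dashes (p : List Char) : List Char := List.replicate p.length '-'

-- fragment lengths of l when the current fragment already has k chars, rendered as dash runs
def splitDash (l : List Char) (k : Nat) : List (List Char) :=
  match l with
  | [] => [List.replicate k '-']
  | c :: rest => if c = ' ' then List.replicate k '-' :: splitDash rest 0 else splitDash rest (k + 1)

theorem splitDash_ne_nil (l : List Char) (k : Nat) : splitDash l k ≠ [] := by
  induction l generalizing k with
  | nil => simp [splitDash]
  | cons c rest ih => by_cases h : c = ' ' <;> simp [splitDash, h, ih]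

theorem upperChar_maskChar (c : Char) : PySem.Chars.upperChar (maskChar c) = maskChar c := by
  unfold maskChar; split_ifs <;> decide

-- A's loop, from index j on, appends exactly the mask of the suffix
theorem loopA (cs : List Char) (j : Nat) (st : List Char × Int) (hj : j ≤ cs.length) :
    ((PySem.List.pyRange (j : Int) (cs.length : Int) 1).foldl
      (fun (st : List Char × Int) i =>
        match PySem.List.pyGet? cs i with
        | some c => if c = ' ' then (st.1 ++ [c], st.2 + 1) else (st.1 ++ ['-'], st.2)
        | none => st) st).1 = st.1 ++ (cs.drop j).map maskChar := by
  rcases Nat.lt_or_ge j cs.length with h | h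
  · have hcons : PySem.List.pyRange (j : Int) (cs.length : Int) 1
        = (j : Int) :: PySem.List.pyRange ((j : Int) + 1) (cs.length : Int) 1 := by
      apply PySem.List.pyRange_one_cons; exact_mod_cast h
    have hget : PySem.List.pyGet? cs (j : Int) = some cs[j] := by
      simp [PySem.List.pyGet?_natCast, List.getElem?_eq_getElem h]
    have hdrop : cs.drop j = cs[j] :: cs.drop (j + 1) := List.drop_eq_getElem_cons h
    have ih := loopA cs (j + 1)
      (if cs[j] = ' ' then (st.1 ++ [cs[j]], st.2 + 1) else (st.1 ++ ['-'], st.2)) h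
    rw [hcons]
    simp only [List.foldl_cons, hget]
    by_cases hc : cs[j] = ' '
    · simp only [hc, if_true] at ih ⊢
      push_cast at ih ⊢
      rw [ih, hdrop]
      simp [maskChar, hc]
    · simp only [if_neg hc] at ih ⊢
      push_cast at ih ⊢
      rw [ih, hdrop]
      simp only [List.map_cons, maskChar, if_neg hc, List.append_assoc, List.singleton_append]
  · have hj' : j = cs.length := le_antisymm hj h
    subst hj'
    simp [PySem.List.pyRange]
termination_by cs.length - j
decreasing_by omega

-- B's split/map, started with a partial fragment of k chars, yields splitDash
theorem go_dash (fuel : Nat) (l cur : List Char) (acc : List (List Char))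
    (h : l.length < fuel) :
    (PySem.Chars.splitOn.go [' '] fuel l cur acc).map dashes
      = (acc.map dashes).reverse ++ splitDash l cur.length := by
  match fuel, l with
  | fuel + 1, [] =>
    simp [PySem.Chars.splitOn.go, splitDash, dashes]
  | fuel + 1, c :: rest =>
    by_cases hc : c = ' '
    · have hpre : List.isPrefixOf [' '] (c :: rest) = true := by simp [hc, List.isPrefixOf]
      rw [PySem.Chars.splitOn.go]
      simp only [hpre, if_true]
      have := go_dash fuel rest [] (cur.reverse :: acc) (by simp at h; omega)
      simp only [List.length_nil] at this
      simp only [List.length_cons, List.length_nil, List.drop_succ_cons, List.drop_zero, if_true] at *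
      rw [this]
      simp [splitDash, hc, dashes]
    · have hpre : List.isPrefixOf [' '] (c :: rest) = false := by
        simp [List.isPrefixOf]; exact fun h' => hc h'.symm
      rw [PySem.Chars.splitOn.go]
      simp only [hpre]
      have := go_dash fuel rest (c :: cur) acc (by simp at h; omega)
      simp only [List.length_cons] at this
      simp only [Bool.false_eq_true, if_false]
      rw [this]
      simp [splitDash, hc]

theorem join_splitDash (l : List Char) (k : Nat) :
    PySem.Chars.join [' '] (splitDash l k) = List.replicate k '-' ++ l.map maskChar := by
  induction l generalizing k with
  | nil => simp [splitDash, PySem.Chars.join_singleton]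
  | cons c rest ih =>
    by_cases hc : c = ' '
    · obtain ⟨p, ps, hps⟩ : ∃ p ps, splitDash rest 0 = p :: ps := by
        cases hsd : splitDash rest 0 with
        | nil => exact absurd hsd (splitDash_ne_nil rest 0)
        | cons p ps => exact ⟨p, ps, rfl⟩
      have ihr := ih 0
      rw [hps] at ihr
      simp only [splitDash, hc, if_true, hps]
      rw [PySem.Chars.join_cons_cons, ← hps, show PySem.Chars.join [' '] (splitDash rest 0) = _ from ih 0]
      simp [maskChar, hc]
    · simp only [splitDash, if_neg hc]
      rw [ih (k + 1)]
      have : List.replicate (k + 1) '-' = List.replicate k '-' ++ ['-'] := by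
        simpa using (List.replicate_succ' : List.replicate (k+1) '-' = _)
      rw [this]
      simp [maskChar, hc]

theorem alt_eq_mask (word : String) :
    criptografar_alt word = String.ofList (word.toList.map maskChar) := by
  unfold criptografar_alt
  have h1 : (PySem.Chars.splitOn word.toList [' ']).map dashes
      = splitDash word.toList 0 := by
    have := go_dash (word.toList.length + 1) word.toList [] [] (by omega)
    simpa [PySem.Chars.splitOn] using this
  have h2 : (PySem.Chars.splitOn word.toList [' ']).map (fun p => List.replicate p.length '-')
      = splitDash word.toList 0 := by
    simpa [dashes] using h1
  rw [h2, join_splitDash]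
  simp

-- ===== VERDICT (by name: the statement is the Claim_ definition above) =====
theorem criptografar_spec : Claim_equal_criptografar := by
  intro word _
  unfold Spec_criptografar criptografar
  rw [alt_eq_mask]
  simp only []
  have := loopA word.toList 0 ([], 0) (Nat.zero_le _)
  simp only [Nat.cast_zero, List.drop_zero, List.nil_append] at this
  rw [this]
  simp only [PySem.Chars.upper, List.map_map]
  exact congrArg String.ofList (List.map_congr_left fun c _ => upperChar_maskChar c)
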